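-- pv_equiv track=rewrite | github.com/SeungBack/BlenderProc | aumask/run_script.py | get_obj_id_by_idx
-- ===== SOURCE A (Python) =====
-- DATASETS = ("hb", "icbin", "icmi", "itodd", "lm", "ruapc", "tless", "tudl", "tyol", "ycbv")
--
-- def get_obj_id_by_idx(obj_id_dict, obj_idx):
--     idx = 0
--     for dataset in DATASETS:
--         for obj_id in obj_id_dict[dataset]:
--             if obj_idx == idx:
--                 return obj_id, dataset
--             else:
--                 idx += 1
-- ===== SOURCE B (Python) =====
-- DATASETS = ("hb", "icbin", "icmi", "itodd", "lm", "ruapc", "tless", "tudl", "tyol", "ycbv")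
--
-- def get_obj_id_by_idx(obj_id_dict, obj_idx):
--     for dataset in DATASETS:
--         items = obj_id_dict[dataset]
--         n = len(items)
--         if 0 <= obj_idx < n:
--             return items[obj_idx], dataset
--         obj_idx -= n
-- ===== Notes on version B (the rewrite author's own statement) =====
-- stated objective: simpler
-- what changed: B replaces A's nested loop that counts every element with a single loop over the ten dataset groups doing length arithmetic (obj_idx -= len) and one direct index into the matching group.
import Mathlib
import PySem

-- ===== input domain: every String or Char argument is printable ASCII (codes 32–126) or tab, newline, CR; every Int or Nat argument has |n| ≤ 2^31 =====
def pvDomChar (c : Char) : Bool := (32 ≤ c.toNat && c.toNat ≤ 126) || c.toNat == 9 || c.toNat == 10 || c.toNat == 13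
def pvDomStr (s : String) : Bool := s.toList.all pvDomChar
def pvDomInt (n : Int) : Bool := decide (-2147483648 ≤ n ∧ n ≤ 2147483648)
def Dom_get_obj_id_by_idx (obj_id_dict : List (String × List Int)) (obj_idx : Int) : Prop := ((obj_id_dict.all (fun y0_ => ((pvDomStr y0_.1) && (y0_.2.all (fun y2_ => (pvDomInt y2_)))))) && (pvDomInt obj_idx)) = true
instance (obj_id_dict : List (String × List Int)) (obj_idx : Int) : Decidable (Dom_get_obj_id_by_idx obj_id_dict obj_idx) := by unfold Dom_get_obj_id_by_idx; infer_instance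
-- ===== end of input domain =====

-- B replaces A's element-by-element index counting with per-dataset length arithmetic and
-- one direct index (simpler decomposition; same results, same KeyError pattern).

-- dict lookup obj_id_dict[dataset]: first match in the association list (none = KeyError)
def pvLookup (d : List (String × List Int)) (k : String) : Option (List Int) :=
  (d.find? (fun p => p.1 == k)).map (·.2)

def pvDatasets : List String :=
  ["hb", "icbin", "icmi", "itodd", "lm", "ruapc", "tless", "tudl", "tyol", "ycbv"]

-- ===== PORT A =====
-- inner 'for obj_id in obj_id_dict[dataset]': returns the hit, or the advanced idx
def aScan : List Int → String → Int → Int → (Int × String) ⊕ Int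
  | [], _, _, idx => Sum.inr idx
  | x :: xs, name, q, idx => if q = idx then Sum.inl (x, name) else aScan xs name q (idx + 1)

-- outer 'for dataset in DATASETS' with running idx
def aLoop (d : List (String × List Int)) (q : Int) : List String → Int → Option (Int × String)
  | [], _ => none
  | name :: rest, idx =>
    match pvLookup d name with
    | none => none                     -- KeyError; outside Pre_
    | some items =>
      match aScan items name q idx with
      | Sum.inl r => some r
      | Sum.inr idx' => aLoop d q rest idx'

def get_obj_id_by_idx (obj_id_dict : List (String × List Int)) (obj_idx : Int) : Option (Int × String) :=
  aLoop obj_id_dict obj_idx pvDatasets 0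

-- ===== PORT B =====
def bLoop (d : List (String × List Int)) : List String → Int → Option (Int × String)
  | [], _ => none
  | name :: rest, i =>
    match pvLookup d name with
    | none => none                     -- KeyError; outside Pre_
    | some items =>
      if 0 ≤ i ∧ i < (items.length : Int) then
        match PySem.List.pyGet? items i with   -- items[i]; in range, so some
        | some x => some (x, name)
        | none => none
      else bLoop d rest (i - items.length)

def get_obj_id_by_idx_alt (obj_id_dict : List (String × List Int)) (obj_idx : Int) : Option (Int × String) :=
  bLoop obj_id_dict pvDatasets obj_idx

-- ===== PRECONDITION & SPEC =====
-- Pre_ = exactly where Python A returns (no KeyError): either all ten dataset names are keys,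
-- or obj_idx is found within the maximal prefix of DATASETS whose names are all present.
def pvPrefixCount (d : List (String × List Int)) : Int :=
  ((pvDatasets.takeWhile (fun n => (pvLookup d n).isSome)).map
    (fun n => ((pvLookup d n).getD []).length)).sum
def Pre_get_obj_id_by_idx (obj_id_dict : List (String × List Int)) (obj_idx : Int) : Prop :=
  (pvDatasets.all (fun n => (pvLookup obj_id_dict n).isSome) = true) ∨
  (0 ≤ obj_idx ∧ obj_idx < pvPrefixCount obj_id_dict)
instance (obj_id_dict : List (String × List Int)) (obj_idx : Int) : Decidable (Pre_get_obj_id_by_idx obj_id_dict obj_idx) := by unfold Pre_get_obj_id_by_idx; infer_instance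

def pvWitness_get_obj_id_by_idx : (List (String × List Int)) × Int :=
  ([("hb", [3]), ("icbin", []), ("icmi", [7]), ("itodd", []), ("lm", [1, 2]),
    ("ruapc", []), ("tless", []), ("tudl", [5]), ("tyol", []), ("ycbv", [9])], 3)

def Spec_get_obj_id_by_idx (obj_id_dict : List (String × List Int)) (obj_idx : Int) (out : Option (Int × String)) : Prop := out = get_obj_id_by_idx_alt obj_id_dict obj_idx
instance (obj_id_dict : List (String × List Int)) (obj_idx : Int) (out : Option (Int × String)) : Decidable (Spec_get_obj_id_by_idx obj_id_dict obj_idx out) := by unfold Spec_get_obj_id_by_idx; infer_instance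

-- ===== CLAIM (what is proved, stated in full; the proofs are below) =====
def Claim_equal_get_obj_id_by_idx : Prop := ∀ (obj_id_dict : List (String × List Int)) (obj_idx : Int), Dom_get_obj_id_by_idx obj_id_dict obj_idx → Pre_get_obj_id_by_idx obj_id_dict obj_idx → Spec_get_obj_id_by_idx obj_id_dict obj_idx (get_obj_id_by_idx obj_id_dict obj_idx)

-- ===== LEMMAS AND PROOFS =====
-- A's inner scan, characterised by an index lookup at offset q - idx
lemma aScan_eq (items : List Int) (name : String) (q : Int) :
    ∀ idx : Int, aScan items name q idx =
      match (if 0 ≤ q - idx then PySem.List.pyGet? items (q - idx) else none) with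
      | some x => Sum.inl (x, name)
      | none => Sum.inr (idx + items.length) := by
  induction items with
  | nil =>
    intro idx
    simp [aScan, PySem.List.pyGet?, PySem.List.pyIdx?]
  | cons x xs ih =>
    intro idx
    by_cases h : q = idx
    · subst h
      simp [aScan, PySem.List.pyGet?, PySem.List.pyIdx?]
    · by_cases h0 : 0 ≤ q - idx
      · have h1 : 0 < q - idx := by omega
        have hget : PySem.List.pyGet? (x :: xs) (q - idx) = PySem.List.pyGet? xs (q - idx - 1) := by
          conv_lhs => rw [show q - idx = ((q - idx - 1).toNat : Int) + 1 by omega]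
          rw [PySem.List.pyGet?_cons_succ, PySem.List.pyGet?_natCast,
            PySem.List.pyGet?_of_nonneg xs (by omega : (0:Int) ≤ q - idx - 1)]
        have h0' : 0 ≤ q - (idx + 1) := by omega
        simp only [aScan, if_neg h, ih (idx + 1), if_pos h0, if_pos h0', hget]
        have heq : q - (idx + 1) = q - idx - 1 := by ring
        rw [heq]
        cases PySem.List.pyGet? xs (q - idx - 1) with
        | none => simp; omega
        | some y => simp
      · have h0' : ¬ 0 ≤ q - (idx + 1) := by omega
        simp only [aScan, if_neg h, ih (idx + 1), if_neg h0, if_neg h0']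
        simp; omega

-- invariant: B's running obj_idx is A's obj_idx minus A's running idx
lemma loop_eq (d : List (String × List Int)) (q : Int) :
    ∀ (names : List String) (idx : Int), aLoop d q names idx = bLoop d names (q - idx) := by
  intro names
  induction names with
  | nil => intro idx; simp [aLoop, bLoop]
  | cons name rest ih =>
    intro idx
    simp only [aLoop, bLoop]
    cases hlk : pvLookup d name with
    | none => rfl
    | some items =>
      dsimp only
      rw [aScan_eq items name q idx]
      by_cases hc : 0 ≤ q - idx ∧ q - idx < (items.length : Int)
      · have h01 : idx ≤ q := by omega
        have h02 : q - idx < (items.length : Int) := hc.2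
        simp [h01, h02]
      · by_cases h0 : 0 ≤ q - idx
        · have hnone : PySem.List.pyGet? items (q - idx) = none := by
            rw [PySem.List.pyGet?_of_nonneg items h0]
            have hge : ¬ (q - idx).toNat < items.length := by omega
            simp [hge]
          rw [if_neg hc]
          simp only [if_pos h0, hnone]
          rw [ih (idx + items.length)]
          congr 1; ring
        · rw [if_neg hc]
          simp only [if_neg h0]
          rw [ih (idx + items.length)]
          congr 1; ring

-- ===== VERDICT (by name: the statement is the Claim_ definition above) =====
theorem get_obj_id_by_idx_spec : Claim_equal_get_obj_id_by_idx := by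
  intro d q _ _
  show get_obj_id_by_idx d q = get_obj_id_by_idx_alt d q
  unfold get_obj_id_by_idx get_obj_id_by_idx_alt
  rw [loop_eq d q pvDatasets 0, sub_zero]
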